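-- pv_equiv track=rewrite | github.com/abdullahau/Data-Structures-and-Algorithms-Spring-2024 | Exercises/Week 3/listsplit.py | count
-- ===== SOURCE A (Python) =====
-- def count(t):
--     l = t[0]
--     a = []
--     for i, v in enumerate(t):
--         if v < l:
--             l = v
--             a = [i]
--         elif v == l:
--             a.append(i)
--     result = a[-1] - a[0]
--     return result
-- ===== SOURCE B (Python) =====
-- def count(t):
--     first_elem = t[0]  # empty input raises IndexError, same as A
--     mn = min(t)
--     first = t.index(mn)
--     last = len(t) - 1 - t[::-1].index(mn)
--     return last - first
-- ===== Notes on version B (the rewrite author's own statement) =====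
-- stated objective: idiomatic
-- what changed: Replaces the single scan that maintains a running list of all min-value indices with a min() pass plus t.index(mn) and a reversed-list index() lookup for the first and last positions.
import Mathlib
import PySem

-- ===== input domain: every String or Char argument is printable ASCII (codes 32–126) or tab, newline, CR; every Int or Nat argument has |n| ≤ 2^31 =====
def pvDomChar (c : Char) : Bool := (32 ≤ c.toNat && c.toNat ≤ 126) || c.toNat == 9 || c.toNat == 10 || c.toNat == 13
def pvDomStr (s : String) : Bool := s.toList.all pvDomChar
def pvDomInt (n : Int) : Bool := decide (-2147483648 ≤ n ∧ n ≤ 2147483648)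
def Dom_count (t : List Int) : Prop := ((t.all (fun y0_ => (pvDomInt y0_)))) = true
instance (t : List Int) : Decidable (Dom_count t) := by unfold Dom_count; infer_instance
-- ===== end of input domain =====

-- B computes the same last-minus-first min-index distance via min() and two index lookups instead of a tracking loop.

-- ===== PORT A =====
-- single scan over enumerate(t) keeping the running min l and the list a of its index positions
def count (t : List Int) : Int :=
  match PySem.List.pyGet? t 0 with
  | none => 0   -- unreachable under Pre_count: t[0] raises IndexError on []
  | some l0 =>
    let st := (PySem.List.enumerate t 0).foldl
      (fun (s : Int × List Int) p =>
        if p.2 < s.1 then (p.2, [p.1])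
        else if p.2 = s.1 then (s.1, s.2 ++ [p.1])
        else s) (l0, ([] : List Int))
    match PySem.List.pyGet? st.2 (-1), PySem.List.pyGet? st.2 0 with
    | some last, some first => last - first
    | _, _ => 0   -- unreachable: a is nonempty whenever t is

-- ===== PORT B =====
-- each 'none' default (0) is unreachable under Pre_count: t[0] raises on [] and otherwise min/index succeed
def count_alt (t : List Int) : Int :=
  (PySem.List.pyGet? t 0).elim 0 (fun _ =>
    (PySem.List.min? t (fun y => y)).elim 0 (fun mn =>
      (PySem.List.index? t mn).elim 0 (fun first =>
        ((PySem.List.slice? t none none (-1)).bind (fun r => PySem.List.index? r mn)).elim 0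
          (fun ridx => ((t.length : Int) - 1 - (ridx : Int)) - (first : Int)))))

-- ===== PRECONDITION & SPEC =====
-- A raises IndexError on the empty list (t[0]); B raises there too.
def Pre_count (t : List Int) : Prop := t ≠ []
instance (t : List Int) : Decidable (Pre_count t) := by unfold Pre_count; infer_instance
def pvWitness_count : List Int := [3, 1, 2, 1]

def Spec_count (t : List Int) (out : Int) : Prop := out = count_alt t
instance (t : List Int) (out : Int) : Decidable (Spec_count t out) := by unfold Spec_count; infer_instance

-- ===== CLAIM (what is proved, stated in full; the proofs are below) =====
def Claim_equal_count : Prop := ∀ (t : List Int), Dom_count t → Pre_count t → Spec_count t (count t)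

-- ===== LEMMAS AND PROOFS =====

-- A's loop state after the whole scan: running min and the positions of all its occurrences
theorem scanA_char (ys : List Int) (s l : Int) (a : List Int) :
    (PySem.List.enumerate ys s).foldl
      (fun (st : Int × List Int) p =>
        if p.2 < st.1 then (p.2, [p.1])
        else if p.2 = st.1 then (st.1, st.2 ++ [p.1])
        else st) (l, a)
    = (ys.foldl min l,
       (if ys.foldl min l = l then a else []) ++
         ((PySem.List.enumerate ys s).filter (fun p => decide (p.2 = ys.foldl min l))).map (·.1)) := by
  induction ys generalizing s l a with
  | nil => simp
  | cons v ys ih =>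
    rw [PySem.List.enumerate_cons]
    simp only [List.foldl_cons, List.filter_cons]
    by_cases h1 : v < l
    · have hlv : min l v = v := by omega
      rw [if_pos h1, ih]
      simp only [hlv]
      have hne : ¬ ys.foldl min v = l := by
        have := (PySem.List.foldl_min_le ys v).1
        omega
      rw [if_neg hne]
      by_cases h2 : v = ys.foldl min v
      · simp [← h2]
      · have h2' : ¬ ys.foldl min v = v := fun h => h2 h.symm
        simp [h2, h2']
    · rw [if_neg h1]
      by_cases h2 : v = l
      · subst h2
        have hlv : min v v = v := by omega
        rw [if_pos rfl, ih]
        simp only [hlv]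
        by_cases h3 : ys.foldl min v = v
        · simp [h3]
        · have h3' : ¬ v = ys.foldl min v := fun h => h3 h.symm
          simp [h3, h3']
      · have hlv : min l v = l := by omega
        rw [if_neg h2, ih]
        simp only [hlv]
        have hvne : ¬ v = ys.foldl min l := by
          have := (PySem.List.foldl_min_le ys l).1
          omega
        simp [hvne]

-- first retained index = idxOf of the minimum
theorem filt_head (t : List Int) (m : Int) (s : Int) (hm : m ∈ t) :
    (((PySem.List.enumerate t s).filter (fun p => decide (p.2 = m))).map (·.1)).head?
      = some (s + (t.idxOf m : Int)) := by
  induction t generalizing s with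
  | nil => cases hm
  | cons v ys ih =>
    rw [PySem.List.enumerate_cons, List.filter_cons]
    by_cases h : v = m
    · subst h
      simp [List.idxOf_cons_self]
    · have hm' : m ∈ ys := by cases hm with
        | head => exact absurd rfl h
        | tail _ h' => exact h'
      have hbeq : (v == m) = false := by simp [h]
      simp only [h, decide_false, Bool.false_eq_true, if_false, List.idxOf_cons, hbeq, cond_false]
      rw [ih (s + 1) hm']
      congr 1
      push_cast
      omega

theorem getLast?_cons_ne_nil {α : Type} (a : α) (l : List α) (h : l ≠ []) :
    (a :: l).getLast? = l.getLast? := by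
  cases l with
  | nil => exact absurd rfl h
  | cons b bs => rw [List.getLast?_cons_cons]

-- last retained index = len - 1 - idxOf of the minimum in the reversed list
theorem filt_last (t : List Int) (m : Int) (s : Int) (hm : m ∈ t) :
    (((PySem.List.enumerate t s).filter (fun p => decide (p.2 = m))).map (·.1)).getLast?
      = some (s + (t.length : Int) - 1 - (t.reverse.idxOf m : Int)) := by
  induction t generalizing s with
  | nil => cases hm
  | cons v ys ih =>
    rw [PySem.List.enumerate_cons, List.filter_cons]
    by_cases hys : m ∈ ys
    · have hne : ((PySem.List.enumerate ys (s+1)).filter (fun p => decide (p.2 = m))).map (·.1) ≠ [] := by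
        intro hnil
        rw [← List.getLast?_eq_none_iff, ih (s+1) hys] at hnil
        cases hnil
      have hidx : (v :: ys).reverse.idxOf m = ys.reverse.idxOf m := by
        rw [List.reverse_cons, List.idxOf_append_of_mem (by simpa using hys)]
      rw [hidx]
      by_cases h : v = m
      · subst h
        simp only [decide_true, if_true, List.map_cons]
        rw [getLast?_cons_ne_nil _ _ hne, ih (s+1) hys]
        congr 1
        simp only [List.length_cons]
        push_cast
        omega
      · simp only [h, decide_false, Bool.false_eq_true, if_false]
        rw [ih (s+1) hys]
        congr 1
        simp only [List.length_cons]
        push_cast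
        omega
    · have hvm : v = m := by cases hm with
        | head => rfl
        | tail _ h' => exact absurd h' hys
      subst hvm
      have hfilt : ((PySem.List.enumerate ys (s+1)).filter (fun p => decide (p.2 = v))) = [] := by
        rw [List.filter_eq_nil_iff]
        intro p hp
        have : p.2 ∈ ys := by
          have := (PySem.List.mem_enumerate_iff _ _ _).mp hp
          obtain ⟨k, hk, rfl⟩ := this
          simp
        simp only [decide_eq_true_eq]
        intro h; exact hys (h ▸ this)
      simp only [decide_true, if_true, hfilt, List.map_cons, List.map_nil,
        List.getLast?_singleton]
      have hrev : (v :: ys).reverse.idxOf v = ys.reverse.length := by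
        rw [List.reverse_cons, List.idxOf_append_of_notMem (by simpa using hys)]
        simp [List.idxOf_cons_self]
      rw [hrev]
      simp
      omega

theorem idxOf?_of_mem (l : List Int) (m : Int) (h : m ∈ l) :
    l.idxOf? m = some (l.idxOf m) := by
  obtain ⟨k, hk⟩ := Option.isSome_iff_exists.mp (by rw [List.isSome_idxOf? (l := l) (a := m)]; exact h)
  rw [hk, List.idxOf_eq_getD_idxOf?, hk]
  rfl

theorem ports_agree_cons (x : Int) (xs : List Int) :
    count (x :: xs) = count_alt (x :: xs) := by
  have hmem : xs.foldl min x ∈ x :: xs := by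
    rcases PySem.List.foldl_min_mem xs x with h | h
    · rw [h]; exact List.mem_cons_self
    · exact List.mem_cons_of_mem _ h
  unfold count count_alt
  rw [PySem.List.pyGet?_zero_cons, PySem.List.min?_id_cons, PySem.List.slice?_none_none_neg_one]
  dsimp only
  simp only [Option.bind_some]
  rw [scanA_char]
  set m := xs.foldl min x with hm
  have hfold : (x :: xs).foldl min x = m := by simp [hm]
  -- the retained index list
  set il := ((PySem.List.enumerate (x :: xs) 0).filter (fun p => decide (p.2 = m))).map (·.1) with hil
  have hhead : il.head? = some ((0 : Int) + ((x :: xs).idxOf m : Int)) := filt_head _ _ _ hmem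
  have hlast : il.getLast? = some ((0 : Int) + ((x :: xs).length : Int) - 1 - ((x :: xs).reverse.idxOf m : Int)) := filt_last _ _ _ hmem
  have hidx : PySem.List.index? (x :: xs) m = some ((x :: xs).idxOf m) := by
    rw [PySem.List.index?_eq_idxOf?, idxOf?_of_mem _ _ hmem]
  have hmemr : m ∈ (x :: xs).reverse := by rw [List.mem_reverse]; exact hmem
  have hidxr : PySem.List.index? (x :: xs).reverse m = some ((x :: xs).reverse.idxOf m) := by
    rw [PySem.List.index?_eq_idxOf?, idxOf?_of_mem _ _ hmemr]
  rw [hfold]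
  have hgoal : ((if m = x then ([] : List Int) else []) ++ il) = il := by simp
  rw [hgoal]
  rw [PySem.List.pyGet?_neg_one, PySem.List.pyGet?_zero, ← List.head?_eq_getElem?]
  rw [hhead, hlast]
  simp only [Option.elim_some]
  rw [hidx, hidxr]
  simp only [Option.elim_some]
  ring

-- ===== VERDICT (by name: the statement is the Claim_ definition above) =====
theorem count_spec : Claim_equal_count := by
  intro t _ hpre
  unfold Spec_count
  cases t with
  | nil => exact absurd rfl hpre
  | cons x xs => exact ports_agree_cons x xs
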